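-- pv_equiv track=rewrite | github.com/lis999/python-basics | Codewars/Sum of deduct result of pairs in list.py | sum_of_diff
-- ===== SOURCE A (Python) =====
-- def sum_of_diff(arr):
--     if len(arr) <= 1:
--         return 0
--
--     diff = []
--     arr.sort(reverse = True)
--     for i in range(len(arr)):
--         if i + 1 < len(arr):
--             t = abs(arr[i] - arr[i + 1])
--             diff.append(t)
--     return sum(diff)
-- ===== SOURCE B (Python) =====
-- def sum_of_diff(arr):
--     # Telescoping: after sorting descending, adjacent differences sum to max-min.
--     # Single linear scan, no sort. (Note: original A sorts arr in place; B does not mutate.)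
--     if not arr:
--         return 0
--     mn = mx = arr[0]
--     for x in arr[1:]:
--         if x < mn:
--             mn = x
--         if x > mx:
--             mx = x
--     return mx - mn
-- ===== Notes on version B (the rewrite author's own statement) =====
-- stated objective: faster
-- what changed: Replaced sort-then-sum-of-adjacent-absolute-differences with a single linear scan computing max-min (the descending adjacent differences telescope).
import Mathlib
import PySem

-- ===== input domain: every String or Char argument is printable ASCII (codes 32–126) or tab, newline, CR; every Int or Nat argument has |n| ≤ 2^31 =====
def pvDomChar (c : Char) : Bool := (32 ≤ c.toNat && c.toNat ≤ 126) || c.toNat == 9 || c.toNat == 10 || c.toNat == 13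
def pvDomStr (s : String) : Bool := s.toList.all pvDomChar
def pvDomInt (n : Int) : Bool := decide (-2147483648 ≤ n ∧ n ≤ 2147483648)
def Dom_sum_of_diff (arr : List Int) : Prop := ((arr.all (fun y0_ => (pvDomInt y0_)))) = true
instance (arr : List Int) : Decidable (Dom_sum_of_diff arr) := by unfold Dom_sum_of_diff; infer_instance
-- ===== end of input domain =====

-- B replaces A's sort + sum of adjacent absolute differences with a single linear
-- scan returning max - min (the descending adjacent differences telescope): an asymptotically faster algorithm.
-- A sorts its argument in place (arr.sort()); the equivalence proved here is about the return value only (B does not mutate).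


-- ===== PORT A =====
def sum_of_diff (arr : List Int) : Int :=
  if arr.length ≤ 1 then 0
  else
    let s := PySem.List.sorted arr (fun x => x) true
    let diff : List Int := (PySem.List.pyRange 0 (s.length : Int) 1).foldl
      (fun acc i =>
        if i + 1 < (s.length : Int) then
          acc ++ [|PySem.List.pyGetD s i 0 - PySem.List.pyGetD s (i + 1) 0|]
        else acc) []
    diff.sum

-- ===== PORT B =====
def sum_of_diff_alt (arr : List Int) : Int :=
  match arr with
  | [] => 0
  | a :: rest =>
    let p := rest.foldl (fun (p : Int × Int) x =>
        (if x < p.1 then x else p.1, if x > p.2 then x else p.2)) (a, a)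
    p.2 - p.1

-- ===== PRECONDITION & SPEC =====
def Spec_sum_of_diff (arr : List Int) (out : Int) : Prop := out = sum_of_diff_alt arr
instance (arr : List Int) (out : Int) : Decidable (Spec_sum_of_diff arr out) := by unfold Spec_sum_of_diff; infer_instance

-- ===== CLAIM (what is proved, stated in full; the proofs are below) =====
def Claim_equal_sum_of_diff : Prop := ∀ (arr : List Int), Dom_sum_of_diff arr → Spec_sum_of_diff arr (sum_of_diff arr)

-- ===== LEMMAS AND PROOFS =====

-- B's paired fold is the pair of a min-fold and a max-fold.
theorem fold_minmax (rest : List Int) (mn mx : Int) :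
    rest.foldl (fun (p : Int × Int) x =>
        (if x < p.1 then x else p.1, if x > p.2 then x else p.2)) (mn, mx)
      = (rest.foldl min mn, rest.foldl max mx) := by
  induction rest generalizing mn mx with
  | nil => rfl
  | cons b t ih =>
      simp only [List.foldl_cons, ih]
      have h1 : (if b < mn then b else mn) = min mn b := by
        rw [min_def]; split_ifs <;> omega
      have h2 : (if b > mx then b else mx) = max mx b := by
        rw [max_def]; split_ifs <;> omega
      rw [h1, h2]

theorem foldl_min_spec (l : List Int) (a : Int) :
    l.foldl min a ∈ a :: l ∧ ∀ x ∈ a :: l, l.foldl min a ≤ x := by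
  induction l generalizing a with
  | nil => simp
  | cons b t ih =>
      obtain ⟨hmem, hle⟩ := ih (min a b)
      have hmn : List.foldl min (min a b) t ≤ min a b := hle (min a b) (by simp)
      constructor
      · show List.foldl min (min a b) t ∈ a :: b :: t
        rcases List.mem_cons.mp hmem with h | h
        · rw [h]; rcases min_choice a b with hc | hc <;> simp [hc]
        · exact List.mem_cons_of_mem _ (List.mem_cons_of_mem _ h)
      · intro x hx
        show List.foldl min (min a b) t ≤ x
        simp only [List.mem_cons] at hx
        rcases hx with rfl | rfl | hx
        · exact le_trans hmn (min_le_left _ _)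
        · exact le_trans hmn (min_le_right _ _)
        · exact hle x (List.mem_cons_of_mem _ hx)

theorem foldl_max_spec (l : List Int) (a : Int) :
    l.foldl max a ∈ a :: l ∧ ∀ x ∈ a :: l, x ≤ l.foldl max a := by
  induction l generalizing a with
  | nil => simp
  | cons b t ih =>
      obtain ⟨hmem, hle⟩ := ih (max a b)
      have hmx : max a b ≤ List.foldl max (max a b) t := hle (max a b) (by simp)
      constructor
      · show List.foldl max (max a b) t ∈ a :: b :: t
        rcases List.mem_cons.mp hmem with h | h
        · rw [h]; rcases max_choice a b with hc | hc <;> simp [hc]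
        · exact List.mem_cons_of_mem _ (List.mem_cons_of_mem _ h)
      · intro x hx
        show x ≤ List.foldl max (max a b) t
        simp only [List.mem_cons] at hx
        rcases hx with rfl | rfl | hx
        · exact le_trans (le_max_left _ _) hmx
        · exact le_trans (le_max_right _ _) hmx
        · exact hle x (List.mem_cons_of_mem _ hx)

-- in a descending (Pairwise ≥) list the last element is a lower bound
theorem last_lb (s : List Int) (h : s.Pairwise (fun x y => y ≤ x)) (hne : s ≠ []) :
    ∀ x ∈ s, s.getLast hne ≤ x := by
  induction s with
  | nil => cases hne rfl
  | cons a t ih =>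
      intro x hx
      rcases List.pairwise_cons.mp h with ⟨ha, ht⟩
      by_cases htnil : t = []
      · subst htnil
        simp only [List.mem_singleton] at hx
        simp [hx]
      · rw [List.getLast_cons htnil]
        rcases List.mem_cons.mp hx with rfl | hx'
        · exact ha _ (List.getLast_mem htnil)
        · exact ih ht htnil x hx'

-- telescoping sum of adjacent differences of a descending list
theorem telescope (t : List Int) :
    ∀ (a : Int), (a :: t).Pairwise (fun x y => y ≤ x) →
    ((List.range t.length).map
        (fun k => |(a :: t).getD k 0 - (a :: t).getD (k + 1) 0|)).sum
      = a - (a :: t).getLast (by simp) := by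
  induction t with
  | nil => intro a _; simp
  | cons b t' ih =>
      intro a hp
      rcases List.pairwise_cons.mp hp with ⟨ha, ht⟩
      have hba : b ≤ a := ha b (by simp)
      rw [List.length_cons, List.range_succ_eq_map]
      simp only [List.map_cons, List.map_map]
      have h0 : |(a :: b :: t').getD 0 0 - (a :: b :: t').getD 1 0| = a - b := by
        simp [List.getD]
        omega
      have hshift :
          ((List.range t'.length).map
            ((fun k => |(a :: b :: t').getD k 0 - (a :: b :: t').getD (k + 1) 0|) ∘ (· + 1)))
          = (List.range t'.length).map
            (fun k => |(b :: t').getD k 0 - (b :: t').getD (k + 1) 0|) := by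
        apply List.map_congr_left
        intro k _
        simp [Function.comp, List.getD]
      rw [h0, hshift, List.sum_cons, ih b ht]
      exact sub_add_sub_cancel a b _

theorem sum_of_diff_spec_aux : ∀ (arr : List Int), sum_of_diff arr = sum_of_diff_alt arr := by
  intro arr
  match arr with
  | [] => rfl
  | [a] => simp [sum_of_diff, sum_of_diff_alt]
  | a :: b :: rest =>
    have h2 : ¬((a :: b :: rest).length ≤ 1) := by simp
    set s := PySem.List.sorted (a :: b :: rest) (fun x => x) true with hsdef
    have hperm : s.Perm (a :: b :: rest) := PySem.List.sorted_perm _ _ _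
    have hpair : s.Pairwise (fun x y => y ≤ x) := PySem.List.sorted_pairwise_rev _ _
    have hsl : s.length = rest.length + 2 := by
      rw [hsdef, PySem.List.length_sorted]; simp
    obtain ⟨h0, tl, hs⟩ : ∃ h0 tl, s = h0 :: tl := by
      cases hcs : s with
      | nil => rw [hcs] at hsl; simp at hsl
      | cons x xs => exact ⟨x, xs, rfl⟩
    -- A's loop builds the list of adjacent absolute differences
    have hA : sum_of_diff (a :: b :: rest)
        = (((PySem.List.pyRange 0 (s.length : Int) 1).filter
              (fun i => decide (i + 1 < (s.length : Int)))).map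
            (fun i => |PySem.List.pyGetD s i 0 - PySem.List.pyGetD s (i + 1) 0|)).sum := by
      simp only [sum_of_diff, if_neg h2, ← hsdef]
      rw [PySem.List.foldl_append_ite
        (p := fun i => i + 1 < (s.length : Int))
        (f := fun i => |PySem.List.pyGetD s i 0 - PySem.List.pyGetD s (i + 1) 0|)]
      simp
    -- the filtered range is range (length - 1)
    have hn1 : (0:Int) ≤ (s.length : Int) - 1 := by omega
    have hsplit : PySem.List.pyRange 0 (s.length : Int) 1
        = PySem.List.pyRange 0 ((s.length : Int) - 1) 1 ++ [(s.length : Int) - 1] := by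
      have := PySem.List.pyRange_one_succ_right (a := 0) (b := (s.length : Int) - 1) hn1
      rw [show (s.length : Int) - 1 + 1 = (s.length : Int) by ring] at this
      exact this
    have hfilter : (PySem.List.pyRange 0 (s.length : Int) 1).filter
          (fun i => decide (i + 1 < (s.length : Int)))
        = PySem.List.pyRange 0 ((s.length : Int) - 1) 1 := by
      rw [hsplit, List.filter_append]
      have hlast : List.filter (fun i => decide (i + 1 < (s.length : Int)))
          [(s.length : Int) - 1] = [] := by
        simp
      rw [hlast, List.append_nil]
      apply List.filter_eq_self.mpr
      intro i hi
      have := (PySem.List.mem_pyRange_one).mp hi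
      simp only [decide_eq_true_eq]
      omega
    -- rewrite as a map over List.range tl.length
    have htl : ((s.length : Int) - 1).toNat = tl.length := by
      rw [hs]
      simp only [List.length_cons]
      omega
    have hmap : ((PySem.List.pyRange 0 ((s.length : Int) - 1) 1).map
            (fun i => |PySem.List.pyGetD s i 0 - PySem.List.pyGetD s (i + 1) 0|))
        = (List.range tl.length).map
            (fun k => |(h0 :: tl).getD k 0 - (h0 :: tl).getD (k + 1) 0|) := by
      rw [PySem.List.pyRange_one, List.map_map]
      rw [show ((s.length : Int) - 1 - 0) = ((s.length : Int) - 1) from by ring, htl]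
      apply List.map_congr_left
      intro k _
      simp only [Function.comp_apply]
      rw [hs]
      rw [show ((0 : Int) + (k : Int)) = ((k : Nat) : Int) from zero_add _]
      rw [show (((k : Nat) : Int) + 1) = (((k + 1 : Nat) : Nat) : Int) from by push_cast; ring]
      rw [PySem.List.pyGetD_natCast, PySem.List.pyGetD_natCast]
    have hpair' : (h0 :: tl).Pairwise (fun x y => y ≤ x) := hs ▸ hpair
    have hAval : sum_of_diff (a :: b :: rest) = h0 - (h0 :: tl).getLast (by simp) := by
      rw [hA, hfilter, hmap, telescope tl h0 hpair']
    -- B's value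
    have hB : sum_of_diff_alt (a :: b :: rest)
        = (b :: rest).foldl max a - (b :: rest).foldl min a := by
      simp only [sum_of_diff_alt, fold_minmax]
    -- max agrees with the sorted head
    obtain ⟨hMmem, hMub⟩ := foldl_max_spec (b :: rest) a
    obtain ⟨hmmem, hmlb⟩ := foldl_min_spec (b :: rest) a
    have hhead_ge : ∀ y ∈ (a :: b :: rest), y ≤ h0 := by
      intro y hy
      exact PySem.List.key_head_sorted_rev_ge _ _ (hsdef.symm.trans hs) y hy
    have hh0mem : h0 ∈ (a :: b :: rest) := hperm.mem_iff.mp (by rw [hs]; simp)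
    have hmax : (b :: rest).foldl max a = h0 :=
      le_antisymm (hhead_ge _ hMmem) (hMub h0 hh0mem)
    -- min agrees with the sorted last
    have hLmem : (h0 :: tl).getLast (by simp) ∈ (a :: b :: rest) :=
      hperm.mem_iff.mp (by rw [hs]; exact List.getLast_mem _)
    have hlast_lb : ∀ x ∈ s, s.getLast (by rw [hs]; simp) ≤ x :=
      last_lb s hpair (by rw [hs]; simp)
    have hmmem' : (b :: rest).foldl min a ∈ s := hperm.mem_iff.mpr hmmem
    have hmin : (b :: rest).foldl min a = (h0 :: tl).getLast (by simp) := by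
      have h1 : (b :: rest).foldl min a ≤ (h0 :: tl).getLast (by simp) :=
        hmlb _ hLmem
      have h2 : s.getLast (by rw [hs]; simp) ≤ (b :: rest).foldl min a :=
        hlast_lb _ hmmem'
      have h3 : s.getLast (by rw [hs]; simp) = (h0 :: tl).getLast (by simp) := by
        congr 1
      omega
    rw [hAval, hB, hmax, hmin]

-- ===== VERDICT (by name: the statement is the Claim_ definition above) =====
theorem sum_of_diff_spec : Claim_equal_sum_of_diff := by
  intro arr _
  exact sum_of_diff_spec_aux arr
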